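-- pv_equiv track=rewrite | github.com/dominicdesy/intelia-expert | data-pipelines/postgreSQL_converter/format_detector.py | _map_line_to_taxonomy
-- ===== SOURCE A (Python) =====
-- from typing import List, Tuple, Optional, Dict
--
-- def _map_line_to_taxonomy(line_name: Optional[str]) -> Tuple[str, str, str]:
--     """Mappe une lignée génétique vers company/breed/species"""
--
--     if not line_name:
--         return "Unknown", "Unknown", "broiler"
--
--     line_lower = line_name.lower()
--
--     if "ross" in line_lower:
--         return "Aviagen", "Ross", "broiler"
--     elif "cobb" in line_lower:
--         return "Cobb-Vantress", "Cobb", "broiler"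
--     elif "hy-line" in line_lower or "hyline" in line_lower:
--         return "EW Group", "Hy-Line", "layer"
--     elif any(
--         term in line_lower for term in ["hubbard", "ranger", "sasso", "freedom"]
--     ):
--         return "Hubbard", "Alternative", "broiler"
--     elif any(
--         term in line_lower
--         for term in ["isa", "lohmann", "dekalb", "bovans", "shaver"]
--     ):
--         return "Layer Genetics", "Commercial Layer", "layer"
--
--     species = (
--         "layer"
--         if any(term in line_lower for term in ["layer", "laying", "brown", "white"])
--         else "broiler"
--     )
--
--     return "Unknown", "Mixed", species
-- ===== SOURCE B (Python) =====
-- from typing import Tuple, Optional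
--
-- # Flat keyword table: (keyword, priority). Lower priority wins; 5 = layer hint.
-- _KEYWORDS = [
--     ("ross", 0), ("cobb", 1), ("hy-line", 2), ("hyline", 2),
--     ("hubbard", 3), ("ranger", 3), ("sasso", 3), ("freedom", 3),
--     ("isa", 4), ("lohmann", 4), ("dekalb", 4), ("bovans", 4), ("shaver", 4),
--     ("layer", 5), ("laying", 5), ("brown", 5), ("white", 5),
-- ]
-- _OUT = [
--     ("Aviagen", "Ross", "broiler"),
--     ("Cobb-Vantress", "Cobb", "broiler"),
--     ("EW Group", "Hy-Line", "layer"),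
--     ("Hubbard", "Alternative", "broiler"),
--     ("Layer Genetics", "Commercial Layer", "layer"),
--     ("Unknown", "Mixed", "layer"),
-- ]
--
-- def _scan(text: str) -> int:
--     """One left-to-right scan: at each position, note which keywords start
--     there; return the minimal priority matched anywhere (6 = no match)."""
--     best = 6
--     for i in range(len(text)):
--         for term, pri in _KEYWORDS:
--             if pri < best and text.startswith(term, i):
--                 best = pri
--     return best
--
-- def _map_line_to_taxonomy(line_name: Optional[str]) -> Tuple[str, str, str]:
--     if not line_name:
--         return "Unknown", "Unknown", "broiler"
--     best = _scan(line_name.lower())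
--     if best < 6:
--         return _OUT[best]
--     return "Unknown", "Mixed", "broiler"
-- ===== Notes on version B (the rewrite author's own statement) =====
-- stated objective: alternative
-- what changed: Instead of testing each hard-coded rule's substrings against the whole string in if/elif order, B makes one left-to-right scan over the positions of the lowered text, checking which keywords of a flat (keyword, priority) table start at each position and keeping the minimal priority matched, then indexes an outcome table with it.
import Mathlib
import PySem

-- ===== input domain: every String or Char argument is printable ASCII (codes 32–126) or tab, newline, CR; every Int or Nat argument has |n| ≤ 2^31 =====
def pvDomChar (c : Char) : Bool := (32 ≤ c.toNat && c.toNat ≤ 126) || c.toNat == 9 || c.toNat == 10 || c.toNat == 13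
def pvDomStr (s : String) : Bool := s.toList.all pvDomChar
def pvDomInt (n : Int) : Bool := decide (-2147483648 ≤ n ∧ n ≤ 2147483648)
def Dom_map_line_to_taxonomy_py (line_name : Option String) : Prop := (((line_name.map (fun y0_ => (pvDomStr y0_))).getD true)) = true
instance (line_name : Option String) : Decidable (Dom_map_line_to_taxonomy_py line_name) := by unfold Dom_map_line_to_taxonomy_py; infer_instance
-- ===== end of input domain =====

-- B replaces A's ordered if/elif substring chain by one left-to-right scan of the text
-- that keeps the minimal-priority keyword matched at any position (objective: alternative).

-- ===== PORT A =====
def map_line_to_taxonomy_py (line_name : Option String) : String × String × String :=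
  match line_name with
  | none => ("Unknown", "Unknown", "broiler")
  | some s =>
    if s.toList.isEmpty then ("Unknown", "Unknown", "broiler")
    else
      let line_lower := PySem.Str.lower s
      if PySem.Str.isIn "ross" line_lower then ("Aviagen", "Ross", "broiler")
      else if PySem.Str.isIn "cobb" line_lower then ("Cobb-Vantress", "Cobb", "broiler")
      else if PySem.Str.isIn "hy-line" line_lower || PySem.Str.isIn "hyline" line_lower then
        ("EW Group", "Hy-Line", "layer")
      else if (["hubbard", "ranger", "sasso", "freedom"] : List String).any
          (fun term => PySem.Str.isIn term line_lower) then
        ("Hubbard", "Alternative", "broiler")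
      else if (["isa", "lohmann", "dekalb", "bovans", "shaver"] : List String).any
          (fun term => PySem.Str.isIn term line_lower) then
        ("Layer Genetics", "Commercial Layer", "layer")
      else
        let species :=
          if (["layer", "laying", "brown", "white"] : List String).any
              (fun term => PySem.Str.isIn term line_lower) then "layer" else "broiler"
        ("Unknown", "Mixed", species)

-- ===== PORT B =====
-- flat keyword table (keyword, priority); lower priority wins, 5 = layer hint
def pvKeywords : List (List Char × Nat) :=
  [ ("ross".toList, 0), ("cobb".toList, 1), ("hy-line".toList, 2), ("hyline".toList, 2),
    ("hubbard".toList, 3), ("ranger".toList, 3), ("sasso".toList, 3), ("freedom".toList, 3),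
    ("isa".toList, 4), ("lohmann".toList, 4), ("dekalb".toList, 4), ("bovans".toList, 4), ("shaver".toList, 4),
    ("layer".toList, 5), ("laying".toList, 5), ("brown".toList, 5), ("white".toList, 5) ]

def pvOut : List (String × String × String) :=
  [ ("Aviagen", "Ross", "broiler"),
    ("Cobb-Vantress", "Cobb", "broiler"),
    ("EW Group", "Hy-Line", "layer"),
    ("Hubbard", "Alternative", "broiler"),
    ("Layer Genetics", "Commercial Layer", "layer"),
    ("Unknown", "Mixed", "layer") ]

-- Source B's _scan: text.startswith(term, i) at a nonnegative i is term.isPrefixOf (text.drop i)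
def pvScan (text : List Char) : Nat :=
  (List.range text.length).foldl
    (fun b i =>
      pvKeywords.foldl
        (fun b kp => if kp.2 < b ∧ kp.1.isPrefixOf (text.drop i) then kp.2 else b) b)
    6

def map_line_to_taxonomy_py_alt (line_name : Option String) : String × String × String :=
  match line_name with
  | none => ("Unknown", "Unknown", "broiler")
  | some s =>
    if s.toList.isEmpty then ("Unknown", "Unknown", "broiler")
    else
      let best := pvScan (PySem.Str.lower s).toList
      if best < 6 then pvOut.getD best ("Unknown", "Mixed", "broiler")
      else ("Unknown", "Mixed", "broiler")

-- ===== PRECONDITION & SPEC =====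
def Spec_map_line_to_taxonomy_py (line_name : Option String) (out : String × String × String) : Prop := out = map_line_to_taxonomy_py_alt line_name
instance (line_name : Option String) (out : String × String × String) : Decidable (Spec_map_line_to_taxonomy_py line_name out) := by unfold Spec_map_line_to_taxonomy_py; infer_instance

-- ===== CLAIM (what is proved, stated in full; the proofs are below) =====
def Claim_equal_map_line_to_taxonomy_py : Prop := ∀ (line_name : Option String), Dom_map_line_to_taxonomy_py line_name → Spec_map_line_to_taxonomy_py line_name (map_line_to_taxonomy_py line_name)

-- ===== LEMMAS AND PROOFS =====

-- ≤-characterization of a fold whose step satisfies the same characterization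
theorem foldl_le_iff {α : Type} (step : Nat → α → Nat) (Q : α → Nat → Prop)
    (hstep : ∀ b x p, step b x ≤ p ↔ b ≤ p ∨ Q x p) (l : List α) :
    ∀ b p, l.foldl step b ≤ p ↔ b ≤ p ∨ ∃ x ∈ l, Q x p := by
  induction l with
  | nil => simp
  | cons x l ih =>
    intro b p
    simp only [List.foldl_cons, ih, hstep, List.mem_cons]
    constructor
    · rintro (⟨h | h⟩ | ⟨y, hy, hq⟩)
      · exact Or.inl h
      · exact Or.inr ⟨x, Or.inl rfl, h⟩
      · exact Or.inr ⟨y, Or.inr hy, hq⟩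
    · rintro (h | ⟨y, rfl | hy, hq⟩)
      · exact Or.inl (Or.inl h)
      · exact Or.inl (Or.inr hq)
      · exact Or.inr ⟨y, hy, hq⟩

theorem inner_le_iff (text : List Char) (i : Nat) (l : List (List Char × Nat)) (b p : Nat) :
    l.foldl (fun b kp => if kp.2 < b ∧ kp.1.isPrefixOf (text.drop i) then kp.2 else b) b ≤ p ↔
      b ≤ p ∨ ∃ kp ∈ l, kp.2 ≤ p ∧ kp.1.isPrefixOf (text.drop i) = true := by
  refine foldl_le_iff _ (fun kp p => kp.2 ≤ p ∧ kp.1.isPrefixOf (text.drop i) = true) ?_ l b p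
  intro b kp p
  by_cases hpre : kp.1.isPrefixOf (text.drop i) = true <;> by_cases hlt : kp.2 < b <;>
    simp [hpre, hlt] <;> omega

-- a nonempty term matches somewhere ↔ it matches at an in-range position
theorem isIn_iff_exists_lt (t text : List Char) (ht : t ≠ []) :
    PySem.Chars.isIn t text = true ↔
      ∃ i, i < text.length ∧ t.isPrefixOf (text.drop i) = true := by
  rw [← PySem.Chars.exists_prefix_drop_iff_isIn]
  constructor
  · rintro ⟨j, hj⟩
    refine ⟨j, ?_, by simpa [List.isPrefixOf_iff_prefix] using hj⟩
    by_contra h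
    rw [List.drop_eq_nil_of_le (by omega)] at hj
    exact ht (List.prefix_nil.mp hj)
  · rintro ⟨i, _, hi⟩
    exact ⟨i, List.isPrefixOf_iff_prefix.mp hi⟩

theorem pvScan_le_iff (text : List Char) (p : Nat) :
    pvScan text ≤ p ↔
      6 ≤ p ∨ ∃ kp ∈ pvKeywords, kp.2 ≤ p ∧ PySem.Chars.isIn kp.1 text = true := by
  unfold pvScan
  rw [foldl_le_iff _
    (fun i p => ∃ kp ∈ pvKeywords, kp.2 ≤ p ∧ kp.1.isPrefixOf (text.drop i) = true)
    (fun b i p => inner_le_iff text i pvKeywords b p) (List.range text.length) 6 p]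
  constructor
  · rintro (h | ⟨i, hi, kp, hkp, hle, hpre⟩)
    · exact Or.inl h
    · refine Or.inr ⟨kp, hkp, hle, ?_⟩
      rw [← PySem.Chars.exists_prefix_drop_iff_isIn]
      exact ⟨i, List.isPrefixOf_iff_prefix.mp hpre⟩
  · rintro (h | ⟨kp, hkp, hle, hin⟩)
    · exact Or.inl h
    · have ht : kp.1 ≠ [] := by fin_cases hkp <;> simp
      obtain ⟨i, hilt, hpre⟩ := (isIn_iff_exists_lt kp.1 text ht).mp hin
      exact Or.inr ⟨i, List.mem_range.mpr hilt, kp, hkp, hle, hpre⟩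

-- ===== VERDICT (by name: the statement is the Claim_ definition above) =====
theorem map_line_to_taxonomy_py_spec : Claim_equal_map_line_to_taxonomy_py := by
  intro line_name _
  unfold Spec_map_line_to_taxonomy_py map_line_to_taxonomy_py map_line_to_taxonomy_py_alt
  cases line_name with
  | none => rfl
  | some s =>
    by_cases he : s.toList.isEmpty
    · simp [he]
    · simp only [he, Bool.false_eq_true, if_false]
      have hIn : ∀ t : String, PySem.Str.isIn t (PySem.Str.lower s) =
          PySem.Chars.isIn t.toList (PySem.Str.lower s).toList := by
        intro t; simp [PySem.Str.isIn_eq]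
      simp only [hIn]
      generalize (PySem.Str.lower s).toList = text
      have b0 : pvScan text ≤ 0 ↔ PySem.Chars.isIn "ross".toList text = true := by
        rw [pvScan_le_iff]; simp [pvKeywords]
      have b1 : pvScan text ≤ 1 ↔ (PySem.Chars.isIn "ross".toList text = true ∨
          PySem.Chars.isIn "cobb".toList text = true) := by
        rw [pvScan_le_iff]; simp [pvKeywords]
      have b2 : pvScan text ≤ 2 ↔ (PySem.Chars.isIn "ross".toList text = true ∨
          PySem.Chars.isIn "cobb".toList text = true ∨
          PySem.Chars.isIn "hy-line".toList text = true ∨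
          PySem.Chars.isIn "hyline".toList text = true) := by
        rw [pvScan_le_iff]; simp [pvKeywords]
      have b3 : pvScan text ≤ 3 ↔ (PySem.Chars.isIn "ross".toList text = true ∨
          PySem.Chars.isIn "cobb".toList text = true ∨
          PySem.Chars.isIn "hy-line".toList text = true ∨
          PySem.Chars.isIn "hyline".toList text = true ∨
          PySem.Chars.isIn "hubbard".toList text = true ∨
          PySem.Chars.isIn "ranger".toList text = true ∨
          PySem.Chars.isIn "sasso".toList text = true ∨
          PySem.Chars.isIn "freedom".toList text = true) := by
        rw [pvScan_le_iff]; simp [pvKeywords]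
      have b4 : pvScan text ≤ 4 ↔ (PySem.Chars.isIn "ross".toList text = true ∨
          PySem.Chars.isIn "cobb".toList text = true ∨
          PySem.Chars.isIn "hy-line".toList text = true ∨
          PySem.Chars.isIn "hyline".toList text = true ∨
          PySem.Chars.isIn "hubbard".toList text = true ∨
          PySem.Chars.isIn "ranger".toList text = true ∨
          PySem.Chars.isIn "sasso".toList text = true ∨
          PySem.Chars.isIn "freedom".toList text = true ∨
          PySem.Chars.isIn "isa".toList text = true ∨
          PySem.Chars.isIn "lohmann".toList text = true ∨
          PySem.Chars.isIn "dekalb".toList text = true ∨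
          PySem.Chars.isIn "bovans".toList text = true ∨
          PySem.Chars.isIn "shaver".toList text = true) := by
        rw [pvScan_le_iff]; simp [pvKeywords]
      have b5 : pvScan text ≤ 5 ↔ (PySem.Chars.isIn "ross".toList text = true ∨
          PySem.Chars.isIn "cobb".toList text = true ∨
          PySem.Chars.isIn "hy-line".toList text = true ∨
          PySem.Chars.isIn "hyline".toList text = true ∨
          PySem.Chars.isIn "hubbard".toList text = true ∨
          PySem.Chars.isIn "ranger".toList text = true ∨
          PySem.Chars.isIn "sasso".toList text = true ∨
          PySem.Chars.isIn "freedom".toList text = true ∨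
          PySem.Chars.isIn "isa".toList text = true ∨
          PySem.Chars.isIn "lohmann".toList text = true ∨
          PySem.Chars.isIn "dekalb".toList text = true ∨
          PySem.Chars.isIn "bovans".toList text = true ∨
          PySem.Chars.isIn "shaver".toList text = true ∨
          PySem.Chars.isIn "layer".toList text = true ∨
          PySem.Chars.isIn "laying".toList text = true ∨
          PySem.Chars.isIn "brown".toList text = true ∨
          PySem.Chars.isIn "white".toList text = true) := by
        rw [pvScan_le_iff]; simp [pvKeywords]
      have b6 : pvScan text ≤ 6 := (pvScan_le_iff text 6).mpr (Or.inl le_rfl)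
      by_cases g0 : PySem.Chars.isIn "ross".toList text = true
      · have hbv : pvScan text = 0 := Nat.le_zero.mp (b0.mpr g0)
        simp_all [pvOut]
      by_cases g1 : PySem.Chars.isIn "cobb".toList text = true
      · have hp : pvScan text ≤ 1 := b1.mpr (Or.inr (g1))
        have hn : ¬ pvScan text ≤ 0 := fun h => g0 (b0.mp h)
        have hbv : pvScan text = 1 := by omega
        simp_all [pvOut]
      by_cases g2a : PySem.Chars.isIn "hy-line".toList text = true
      · have hp : pvScan text ≤ 2 := b2.mpr (Or.inr (Or.inr (Or.inl g2a)))
        have hn : ¬ pvScan text ≤ 1 := fun h => (b1.mp h).elim g0 g1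
        have hbv : pvScan text = 2 := by omega
        simp_all [pvOut]
      by_cases g2b : PySem.Chars.isIn "hyline".toList text = true
      · have hp : pvScan text ≤ 2 := b2.mpr (Or.inr (Or.inr (Or.inr (g2b))))
        have hn : ¬ pvScan text ≤ 1 := fun h => (b1.mp h).elim g0 g1
        have hbv : pvScan text = 2 := by omega
        simp_all [pvOut]
      by_cases g3a : PySem.Chars.isIn "hubbard".toList text = true
      · have hp : pvScan text ≤ 3 := b3.mpr (Or.inr (Or.inr (Or.inr (Or.inr (Or.inl g3a)))))
        have hn : ¬ pvScan text ≤ 2 := fun h => (b2.mp h).elim g0 (fun x => x.elim g1 (fun x => x.elim g2a g2b))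
        have hbv : pvScan text = 3 := by omega
        simp_all [pvOut]
      by_cases g3b : PySem.Chars.isIn "ranger".toList text = true
      · have hp : pvScan text ≤ 3 := b3.mpr (Or.inr (Or.inr (Or.inr (Or.inr (Or.inr (Or.inl g3b))))))
        have hn : ¬ pvScan text ≤ 2 := fun h => (b2.mp h).elim g0 (fun x => x.elim g1 (fun x => x.elim g2a g2b))
        have hbv : pvScan text = 3 := by omega
        simp_all [pvOut]
      by_cases g3c : PySem.Chars.isIn "sasso".toList text = true
      · have hp : pvScan text ≤ 3 := b3.mpr (Or.inr (Or.inr (Or.inr (Or.inr (Or.inr (Or.inr (Or.inl g3c)))))))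
        have hn : ¬ pvScan text ≤ 2 := fun h => (b2.mp h).elim g0 (fun x => x.elim g1 (fun x => x.elim g2a g2b))
        have hbv : pvScan text = 3 := by omega
        simp_all [pvOut]
      by_cases g3d : PySem.Chars.isIn "freedom".toList text = true
      · have hp : pvScan text ≤ 3 := b3.mpr (Or.inr (Or.inr (Or.inr (Or.inr (Or.inr (Or.inr (Or.inr (g3d))))))))
        have hn : ¬ pvScan text ≤ 2 := fun h => (b2.mp h).elim g0 (fun x => x.elim g1 (fun x => x.elim g2a g2b))
        have hbv : pvScan text = 3 := by omega
        simp_all [pvOut]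
      by_cases g4a : PySem.Chars.isIn "isa".toList text = true
      · have hp : pvScan text ≤ 4 := b4.mpr (Or.inr (Or.inr (Or.inr (Or.inr (Or.inr (Or.inr (Or.inr (Or.inr (Or.inl g4a)))))))))
        have hn : ¬ pvScan text ≤ 3 := fun h => (b3.mp h).elim g0 (fun x => x.elim g1 (fun x => x.elim g2a (fun x => x.elim g2b (fun x => x.elim g3a (fun x => x.elim g3b (fun x => x.elim g3c g3d))))))
        have hbv : pvScan text = 4 := by omega
        simp_all [pvOut]
      by_cases g4b : PySem.Chars.isIn "lohmann".toList text = true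
      · have hp : pvScan text ≤ 4 := b4.mpr (Or.inr (Or.inr (Or.inr (Or.inr (Or.inr (Or.inr (Or.inr (Or.inr (Or.inr (Or.inl g4b))))))))))
        have hn : ¬ pvScan text ≤ 3 := fun h => (b3.mp h).elim g0 (fun x => x.elim g1 (fun x => x.elim g2a (fun x => x.elim g2b (fun x => x.elim g3a (fun x => x.elim g3b (fun x => x.elim g3c g3d))))))
        have hbv : pvScan text = 4 := by omega
        simp_all [pvOut]
      by_cases g4c : PySem.Chars.isIn "dekalb".toList text = true
      · have hp : pvScan text ≤ 4 := b4.mpr (Or.inr (Or.inr (Or.inr (Or.inr (Or.inr (Or.inr (Or.inr (Or.inr (Or.inr (Or.inr (Or.inl g4c)))))))))))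
        have hn : ¬ pvScan text ≤ 3 := fun h => (b3.mp h).elim g0 (fun x => x.elim g1 (fun x => x.elim g2a (fun x => x.elim g2b (fun x => x.elim g3a (fun x => x.elim g3b (fun x => x.elim g3c g3d))))))
        have hbv : pvScan text = 4 := by omega
        simp_all [pvOut]
      by_cases g4d : PySem.Chars.isIn "bovans".toList text = true
      · have hp : pvScan text ≤ 4 := b4.mpr (Or.inr (Or.inr (Or.inr (Or.inr (Or.inr (Or.inr (Or.inr (Or.inr (Or.inr (Or.inr (Or.inr (Or.inl g4d))))))))))))
        have hn : ¬ pvScan text ≤ 3 := fun h => (b3.mp h).elim g0 (fun x => x.elim g1 (fun x => x.elim g2a (fun x => x.elim g2b (fun x => x.elim g3a (fun x => x.elim g3b (fun x => x.elim g3c g3d))))))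
        have hbv : pvScan text = 4 := by omega
        simp_all [pvOut]
      by_cases g4e : PySem.Chars.isIn "shaver".toList text = true
      · have hp : pvScan text ≤ 4 := b4.mpr (Or.inr (Or.inr (Or.inr (Or.inr (Or.inr (Or.inr (Or.inr (Or.inr (Or.inr (Or.inr (Or.inr (Or.inr (g4e)))))))))))))
        have hn : ¬ pvScan text ≤ 3 := fun h => (b3.mp h).elim g0 (fun x => x.elim g1 (fun x => x.elim g2a (fun x => x.elim g2b (fun x => x.elim g3a (fun x => x.elim g3b (fun x => x.elim g3c g3d))))))
        have hbv : pvScan text = 4 := by omega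
        simp_all [pvOut]
      by_cases g5a : PySem.Chars.isIn "layer".toList text = true
      · have hp : pvScan text ≤ 5 := b5.mpr (Or.inr (Or.inr (Or.inr (Or.inr (Or.inr (Or.inr (Or.inr (Or.inr (Or.inr (Or.inr (Or.inr (Or.inr (Or.inr (Or.inl g5a))))))))))))))
        have hn : ¬ pvScan text ≤ 4 := fun h => (b4.mp h).elim g0 (fun x => x.elim g1 (fun x => x.elim g2a (fun x => x.elim g2b (fun x => x.elim g3a (fun x => x.elim g3b (fun x => x.elim g3c (fun x => x.elim g3d (fun x => x.elim g4a (fun x => x.elim g4b (fun x => x.elim g4c (fun x => x.elim g4d g4e)))))))))))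
        have hbv : pvScan text = 5 := by omega
        simp_all [pvOut]
      by_cases g5b : PySem.Chars.isIn "laying".toList text = true
      · have hp : pvScan text ≤ 5 := b5.mpr (Or.inr (Or.inr (Or.inr (Or.inr (Or.inr (Or.inr (Or.inr (Or.inr (Or.inr (Or.inr (Or.inr (Or.inr (Or.inr (Or.inr (Or.inl g5b)))))))))))))))
        have hn : ¬ pvScan text ≤ 4 := fun h => (b4.mp h).elim g0 (fun x => x.elim g1 (fun x => x.elim g2a (fun x => x.elim g2b (fun x => x.elim g3a (fun x => x.elim g3b (fun x => x.elim g3c (fun x => x.elim g3d (fun x => x.elim g4a (fun x => x.elim g4b (fun x => x.elim g4c (fun x => x.elim g4d g4e)))))))))))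
        have hbv : pvScan text = 5 := by omega
        simp_all [pvOut]
      by_cases g5c : PySem.Chars.isIn "brown".toList text = true
      · have hp : pvScan text ≤ 5 := b5.mpr (Or.inr (Or.inr (Or.inr (Or.inr (Or.inr (Or.inr (Or.inr (Or.inr (Or.inr (Or.inr (Or.inr (Or.inr (Or.inr (Or.inr (Or.inr (Or.inl g5c))))))))))))))))
        have hn : ¬ pvScan text ≤ 4 := fun h => (b4.mp h).elim g0 (fun x => x.elim g1 (fun x => x.elim g2a (fun x => x.elim g2b (fun x => x.elim g3a (fun x => x.elim g3b (fun x => x.elim g3c (fun x => x.elim g3d (fun x => x.elim g4a (fun x => x.elim g4b (fun x => x.elim g4c (fun x => x.elim g4d g4e)))))))))))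
        have hbv : pvScan text = 5 := by omega
        simp_all [pvOut]
      by_cases g5d : PySem.Chars.isIn "white".toList text = true
      · have hp : pvScan text ≤ 5 := b5.mpr (Or.inr (Or.inr (Or.inr (Or.inr (Or.inr (Or.inr (Or.inr (Or.inr (Or.inr (Or.inr (Or.inr (Or.inr (Or.inr (Or.inr (Or.inr (Or.inr (g5d)))))))))))))))))
        have hn : ¬ pvScan text ≤ 4 := fun h => (b4.mp h).elim g0 (fun x => x.elim g1 (fun x => x.elim g2a (fun x => x.elim g2b (fun x => x.elim g3a (fun x => x.elim g3b (fun x => x.elim g3c (fun x => x.elim g3d (fun x => x.elim g4a (fun x => x.elim g4b (fun x => x.elim g4c (fun x => x.elim g4d g4e)))))))))))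
        have hbv : pvScan text = 5 := by omega
        simp_all [pvOut]
      · have hn : ¬ pvScan text ≤ 5 := fun h => (b5.mp h).elim g0 (fun x => x.elim g1 (fun x => x.elim g2a (fun x => x.elim g2b (fun x => x.elim g3a (fun x => x.elim g3b (fun x => x.elim g3c (fun x => x.elim g3d (fun x => x.elim g4a (fun x => x.elim g4b (fun x => x.elim g4c (fun x => x.elim g4d (fun x => x.elim g4e (fun x => x.elim g5a (fun x => x.elim g5b (fun x => x.elim g5c g5d)))))))))))))))
        have hbv : pvScan text = 6 := by omega
        simp_all
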